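-- pv_equiv track=rewrite | github.com/jameshung2015/vita-model-researcher | agents-toolchain/governance/audit_changes.py | diff_cats
-- ===== SOURCE A (Python) =====
-- def diff_cats(old: dict, new: dict) -> dict:
--     out = {}
--     keys = set(old.keys()) | set(new.keys())
--     for k in sorted(keys):
--         a = set(old.get(k, []))
--         b = set(new.get(k, []))
--         out[k] = {
--             'added': sorted(b - a),
--             'removed': sorted(a - b),
--             'unchanged': sorted(a & b),
--         }
--     return out
-- ===== SOURCE B (Python) =====
-- def diff_cats(old: dict, new: dict) -> dict:
--     out = {}
--     for k in sorted(set(old.keys()) | set(new.keys())):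
--         sa = sorted(set(old.get(k, [])))
--         sb = sorted(set(new.get(k, [])))
--         added, removed, unchanged = [], [], []
--         i = j = 0
--         while i < len(sa) and j < len(sb):
--             if sa[i] == sb[j]:
--                 unchanged.append(sa[i]); i += 1; j += 1
--             elif sa[i] < sb[j]:
--                 removed.append(sa[i]); i += 1
--             else:
--                 added.append(sb[j]); j += 1
--         removed.extend(sa[i:])
--         added.extend(sb[j:])
--         out[k] = {'added': added, 'removed': removed, 'unchanged': unchanged}
--     return out
-- ===== Notes on version B (the rewrite author's own statement) =====
-- stated objective: alternative
-- what changed: Per key, the set-algebra expressions b-a, a-b, a&b (each followed by its own sort) are replaced by a two-pointer merge of the two sorted deduplicated sides that emits added/removed/unchanged already in order, with no set difference/intersection and no membership tests.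
import Mathlib
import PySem

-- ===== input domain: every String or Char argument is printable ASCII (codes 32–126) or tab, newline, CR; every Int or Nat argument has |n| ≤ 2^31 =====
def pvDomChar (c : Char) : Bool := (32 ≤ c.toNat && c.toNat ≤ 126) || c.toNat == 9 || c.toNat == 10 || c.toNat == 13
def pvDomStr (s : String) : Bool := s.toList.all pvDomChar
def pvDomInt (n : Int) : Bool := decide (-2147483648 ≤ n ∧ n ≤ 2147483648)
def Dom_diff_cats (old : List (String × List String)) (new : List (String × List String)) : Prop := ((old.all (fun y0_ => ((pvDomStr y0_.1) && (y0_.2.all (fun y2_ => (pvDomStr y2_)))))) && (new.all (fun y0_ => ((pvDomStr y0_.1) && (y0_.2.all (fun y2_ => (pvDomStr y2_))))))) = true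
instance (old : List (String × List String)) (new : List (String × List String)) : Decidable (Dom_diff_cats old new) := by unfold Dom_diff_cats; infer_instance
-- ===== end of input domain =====

-- B replaces A's per-key set algebra (b-a, a-b, a&b, each sorted separately) by a
-- two-pointer merge of the two sorted deduplicated sides (objective: alternative, same cost).

-- ===== PORT A =====
def diff_cats (old : List (String × List String)) (new : List (String × List String)) : List (String × List (String × List String)) :=
  let O := PySem.Dict.mk old
  let N := PySem.Dict.mk new
  let keys := PySem.Set.union (PySem.Set.ofList (PySem.Dict.keys O)) (PySem.Set.ofList (PySem.Dict.keys N))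
  ((PySem.List.sorted keys (fun x => x) false).foldl
    (fun out k =>
      let a := PySem.Set.ofList (PySem.Dict.getD O k [])
      let b := PySem.Set.ofList (PySem.Dict.getD N k [])
      PySem.Dict.insert out k
        [("added", PySem.List.sorted (PySem.Set.diff b a) (fun x => x) false),
         ("removed", PySem.List.sorted (PySem.Set.diff a b) (fun x => x) false),
         ("unchanged", PySem.List.sorted (PySem.Set.inter a b) (fun x => x) false)])
    PySem.Dict.empty).items

-- ===== PORT B =====
-- the two-pointer while loop of Source B: structural recursion on the two sorted lists;
-- result = (added, removed, unchanged); the [] cases are the trailing extend calls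
def pvMerge : List String → List String → List String × List String × List String
  | [], sb => (sb, [], [])
  | x :: sa, [] => ([], x :: sa, [])
  | x :: sa, y :: sb =>
    if x = y then
      let r := pvMerge sa sb
      (r.1, r.2.1, x :: r.2.2)
    else if x < y then
      let r := pvMerge sa (y :: sb)
      (r.1, x :: r.2.1, r.2.2)
    else
      let r := pvMerge (x :: sa) sb
      (y :: r.1, r.2.1, r.2.2)
termination_by sa sb => sa.length + sb.length

def diff_cats_alt (old : List (String × List String)) (new : List (String × List String)) : List (String × List (String × List String)) :=
  let O := PySem.Dict.mk old
  let N := PySem.Dict.mk new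
  let keys := PySem.Set.union (PySem.Set.ofList (PySem.Dict.keys O)) (PySem.Set.ofList (PySem.Dict.keys N))
  (PySem.List.sorted keys (fun x => x) false).map
    (fun k =>
      let sa := PySem.List.sorted (PySem.Set.ofList (PySem.Dict.getD O k [])) (fun x => x) false
      let sb := PySem.List.sorted (PySem.Set.ofList (PySem.Dict.getD N k [])) (fun x => x) false
      let r := pvMerge sa sb
      (k, [("added", r.1), ("removed", r.2.1), ("unchanged", r.2.2)]))

-- ===== PRECONDITION & SPEC =====
def Spec_diff_cats (old : List (String × List String)) (new : List (String × List String)) (out : List (String × List (String × List String))) : Prop := out = diff_cats_alt old new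
instance (old : List (String × List String)) (new : List (String × List String)) (out : List (String × List (String × List String))) : Decidable (Spec_diff_cats old new out) := by unfold Spec_diff_cats; infer_instance

-- ===== CLAIM (what is proved, stated in full; the proofs are below) =====
def Claim_equal_diff_cats : Prop := ∀ (old : List (String × List String)) (new : List (String × List String)), Dom_diff_cats old new → Spec_diff_cats old new (diff_cats old new)

-- ===== LEMMAS AND PROOFS =====

-- folding dict-insert over pairwise-fresh nodup keys is a map
theorem pv_foldl_insert_items {V : Type} (ks : List String) (f : String → V)
    (hnd : ks.Nodup) (d : PySem.Dict String V) (hfresh : ∀ k ∈ ks, d.contains k = false) :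
    (ks.foldl (fun out k => PySem.Dict.insert out k (f k)) d).items
      = d.items ++ ks.map (fun k => (k, f k)) := by
  induction ks generalizing d with
  | nil => simp
  | cons k ks ih =>
    simp only [List.foldl_cons, List.map_cons]
    rw [ih hnd.of_cons]
    · rw [PySem.Dict.items_insert_of_not_contains _ _ (hfresh k (by simp))]
      simp
    · intro k' hk'
      rw [PySem.Dict.contains_insert]
      have : k' ≠ k := by
        rintro rfl; exact (List.nodup_cons.mp hnd).1 hk'
      simp [this, hfresh k' (List.mem_cons_of_mem _ hk')]

-- on strictly increasing inputs, the merge returns the three membership filters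
theorem pvMerge_spec : ∀ (sa sb : List String),
    sa.Pairwise (· < ·) → sb.Pairwise (· < ·) →
    pvMerge sa sb
      = (sb.filter (fun z => !decide (z ∈ sa)),
         sa.filter (fun z => !decide (z ∈ sb)),
         sa.filter (fun z => decide (z ∈ sb))) := by
  intro sa sb
  induction sa, sb using pvMerge.induct with
  | case1 sb => intro _ _; simp [pvMerge]
  | case2 x sa => intro _ _; simp [pvMerge]
  | case3 sa y sb ih =>
    intro ha hb
    have ha' := List.pairwise_cons.mp ha
    have hb' := List.pairwise_cons.mp hb
    have h1 : ∀ z ∈ sb, (!decide (z ∈ y :: sa)) = (!decide (z ∈ sa)) := by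
      intro z hz; simp [List.mem_cons, (hb'.1 z hz).ne']
    have h2 : ∀ z ∈ sa, (!decide (z ∈ y :: sb)) = (!decide (z ∈ sb)) := by
      intro z hz; simp [List.mem_cons, (ha'.1 z hz).ne']
    have h3 : ∀ z ∈ sa, (decide (z ∈ y :: sb)) = (decide (z ∈ sb)) := by
      intro z hz; simp [List.mem_cons, (ha'.1 z hz).ne']
    have e1 : List.filter (fun z => !decide (z ∈ y :: sa)) (y :: sb)
        = List.filter (fun z => !decide (z ∈ sa)) sb := by
      rw [List.filter_cons, List.filter_congr h1]; simp
    have e2 : List.filter (fun z => !decide (z ∈ y :: sb)) (y :: sa)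
        = List.filter (fun z => !decide (z ∈ sb)) sa := by
      rw [List.filter_cons, List.filter_congr h2]; simp
    have e3 : List.filter (fun z => decide (z ∈ y :: sb)) (y :: sa)
        = y :: List.filter (fun z => decide (z ∈ sb)) sa := by
      rw [List.filter_cons, List.filter_congr h3]; simp
    rw [pvMerge, if_pos rfl]
    simp only [ih ha'.2 hb'.2]
    rw [e1, e2, e3]
  | case4 x sa y sb hne hlt ih =>
    intro ha hb
    have ha' := List.pairwise_cons.mp ha
    have hb' := List.pairwise_cons.mp hb
    have hxnb : ¬ x ∈ y :: sb := by
      intro h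
      rcases List.mem_cons.mp h with rfl | h
      · exact hne rfl
      · exact (hlt.trans (hb'.1 x h)).ne rfl
    have h1 : ∀ z ∈ y :: sb, (!decide (z ∈ x :: sa)) = (!decide (z ∈ sa)) := by
      intro z hz
      rcases List.mem_cons.mp hz with rfl | hz
      · simp [List.mem_cons, Ne.symm hne]
      · simp [List.mem_cons, (hlt.trans (hb'.1 z hz)).ne']
    have e1 : List.filter (fun z => !decide (z ∈ x :: sa)) (y :: sb)
        = List.filter (fun z => !decide (z ∈ sa)) (y :: sb) := List.filter_congr h1
    have e2 : List.filter (fun z => !decide (z ∈ y :: sb)) (x :: sa)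
        = x :: List.filter (fun z => !decide (z ∈ y :: sb)) sa := by
      rw [List.filter_cons]; simp [hxnb]
    have e3 : List.filter (fun z => decide (z ∈ y :: sb)) (x :: sa)
        = List.filter (fun z => decide (z ∈ y :: sb)) sa := by
      rw [List.filter_cons]; simp [hxnb]
    rw [pvMerge, if_neg hne, if_pos hlt]
    simp only [ih ha'.2 hb]
    rw [e1, e2, e3]
  | case5 x sa y sb hne hnlt ih =>
    intro ha hb
    have ha' := List.pairwise_cons.mp ha
    have hb' := List.pairwise_cons.mp hb
    have hyx : y < x := by
      rcases lt_trichotomy x y with h | h | h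
      · exact absurd h hnlt
      · exact absurd h hne
      · exact h
    have hyna : ¬ y ∈ x :: sa := by
      intro h
      rcases List.mem_cons.mp h with rfl | h
      · exact hyx.ne rfl
      · exact (hyx.trans (ha'.1 y h)).ne rfl
    have h2 : ∀ z ∈ x :: sa, (!decide (z ∈ y :: sb)) = (!decide (z ∈ sb)) := by
      intro z hz
      rcases List.mem_cons.mp hz with rfl | hz
      · simp [List.mem_cons, hyx.ne']
      · simp [List.mem_cons, (hyx.trans (ha'.1 z hz)).ne']
    have h3 : ∀ z ∈ x :: sa, (decide (z ∈ y :: sb)) = (decide (z ∈ sb)) := by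
      intro z hz
      rcases List.mem_cons.mp hz with rfl | hz
      · simp [List.mem_cons, hyx.ne']
      · simp [List.mem_cons, (hyx.trans (ha'.1 z hz)).ne']
    have e1 : List.filter (fun z => !decide (z ∈ x :: sa)) (y :: sb)
        = y :: List.filter (fun z => !decide (z ∈ x :: sa)) sb := by
      rw [List.filter_cons]; simp [hyna]
    have e2 : List.filter (fun z => !decide (z ∈ y :: sb)) (x :: sa)
        = List.filter (fun z => !decide (z ∈ sb)) (x :: sa) := List.filter_congr h2
    have e3 : List.filter (fun z => decide (z ∈ y :: sb)) (x :: sa)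
        = List.filter (fun z => decide (z ∈ sb)) (x :: sa) := List.filter_congr h3
    rw [pvMerge, if_neg hne, if_neg hnlt]
    simp only [ih ha hb'.2]
    rw [e1, e2, e3]

-- sorted of a nodup list is strictly increasing
theorem pv_sorted_pairwise_lt (s : List String) (h : s.Nodup) :
    (PySem.List.sorted s (fun x => x) false).Pairwise (· < ·) := by
  have hle := PySem.List.sorted_pairwise (xs := s) (key := fun x => x)
  have hnd : (PySem.List.sorted s (fun x => x) false).Nodup :=
    (PySem.List.sorted_perm s (fun x => x) false).nodup_iff.mpr h
  have := hle.and hnd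
  exact this.imp (fun h => lt_of_le_of_ne h.1 h.2)

-- sorted(s) equals any strictly increasing list with s's members
theorem pv_sorted_eq_of_mem_iff (s : List String) (l : List String)
    (hs : s.Nodup) (hl : l.Pairwise (· < ·))
    (hmem : ∀ x, x ∈ l ↔ x ∈ s) :
    PySem.List.sorted s (fun x => x) false = l := by
  apply PySem.List.sorted_eq_of_perm_of_pairwise_lt
  · exact (List.perm_ext_iff_of_nodup hl.nodup hs).mpr hmem
  · exact hl

theorem diff_cats_eq_alt (old new : List (String × List String)) :
    diff_cats old new = diff_cats_alt old new := by
  unfold diff_cats diff_cats_alt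
  set O := PySem.Dict.mk old
  set N := PySem.Dict.mk new
  set keys := PySem.Set.union (PySem.Set.ofList (PySem.Dict.keys O)) (PySem.Set.ofList (PySem.Dict.keys N)) with hkeys
  have hknd : (PySem.List.sorted keys (fun x => x) false).Nodup :=
    (PySem.List.sorted_perm _ _ _).nodup_iff.mpr
      (PySem.Set.nodup_union _ _ (PySem.Set.nodup_ofList _))
  rw [pv_foldl_insert_items _ _ hknd PySem.Dict.empty (by intro k _; simp)]
  simp only [PySem.Dict.empty, List.nil_append]
  apply List.map_congr_left
  intro k _
  set a := PySem.Set.ofList (PySem.Dict.getD O k []) with haa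
  set b := PySem.Set.ofList (PySem.Dict.getD N k []) with hbb
  have hna : a.Nodup := PySem.Set.nodup_ofList _
  have hnb : b.Nodup := PySem.Set.nodup_ofList _
  set sa := PySem.List.sorted a (fun x => x) false with hsa
  set sb := PySem.List.sorted b (fun x => x) false with hsb
  have hpa : sa.Pairwise (· < ·) := pv_sorted_pairwise_lt a hna
  have hpb : sb.Pairwise (· < ·) := pv_sorted_pairwise_lt b hnb
  have hmema : ∀ x, x ∈ sa ↔ x ∈ a := fun x => PySem.List.mem_sorted a (fun x => x) false x
  have hmemb : ∀ x, x ∈ sb ↔ x ∈ b := fun x => PySem.List.mem_sorted b (fun x => x) false x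
  rw [pvMerge_spec sa sb hpa hpb]
  have hadd : PySem.List.sorted (PySem.Set.diff b a) (fun x => x) false
      = sb.filter (fun z => !decide (z ∈ sa)) := by
    apply pv_sorted_eq_of_mem_iff _ _ (PySem.Set.nodup_diff _ _ hnb) (hpb.filter _)
    intro x
    simp only [List.mem_filter, PySem.Set.mem_diff, hmemb x, Bool.not_eq_eq_eq_not,
      Bool.not_true, decide_eq_false_iff_not, hmema x]
  have hrem : PySem.List.sorted (PySem.Set.diff a b) (fun x => x) false
      = sa.filter (fun z => !decide (z ∈ sb)) := by
    apply pv_sorted_eq_of_mem_iff _ _ (PySem.Set.nodup_diff _ _ hna) (hpa.filter _)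
    intro x
    simp only [List.mem_filter, PySem.Set.mem_diff, hmema x, Bool.not_eq_eq_eq_not,
      Bool.not_true, decide_eq_false_iff_not, hmemb x]
  have hunch : PySem.List.sorted (PySem.Set.inter a b) (fun x => x) false
      = sa.filter (fun z => decide (z ∈ sb)) := by
    apply pv_sorted_eq_of_mem_iff _ _ (PySem.Set.nodup_inter _ _ hna) (hpa.filter _)
    intro x
    simp only [List.mem_filter, PySem.Set.mem_inter, hmema x, decide_eq_true_eq, hmemb x]
  rw [hadd, hrem, hunch]

-- ===== VERDICT (by name: the statement is the Claim_ definition above) =====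
theorem diff_cats_spec : Claim_equal_diff_cats := by
  intro old new _
  unfold Spec_diff_cats
  exact diff_cats_eq_alt old new
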